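-- pv_equiv track=rewrite | github.com/yiye3/ICLEval | code/model_evaluation/tasks/copy_task.py | check
-- ===== SOURCE A (Python) =====
-- def check(res, label):
--     pred = res.strip()
--     end_tokens = [" ", ",", ".", "!", ":", ")", "\"", "\'", "\n"]
--     for tok in end_tokens:
--         pred = pred.split(tok)[0]
--     if len(pred) == 9 and pred[-1] == 's':
--         pred = pred[:-1]
--
--     if pred == label:
--         return True, pred
--     else:
--         return False, pred
-- ===== SOURCE B (Python) =====
-- def check(res, label):
--     s = res.strip()
--     delims = set(" ,.!:)\"'\n")
--     cut = []
--     for ch in s: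
--         if ch in delims:
--             break
--         cut.append(ch)
--     pred = "".join(cut)
--     if len(pred) == 9 and pred[-1] == 's':
--         pred = pred[:-1]
--     return pred == label, pred
-- ===== Notes on version B (the rewrite author's own statement) =====
-- stated objective: simpler
-- what changed: Replaces the nine sequential split(tok)[0] passes (each re-scanning and rebuilding the string) by a single left-to-right scan that stops at the first delimiter character.
import Mathlib
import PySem

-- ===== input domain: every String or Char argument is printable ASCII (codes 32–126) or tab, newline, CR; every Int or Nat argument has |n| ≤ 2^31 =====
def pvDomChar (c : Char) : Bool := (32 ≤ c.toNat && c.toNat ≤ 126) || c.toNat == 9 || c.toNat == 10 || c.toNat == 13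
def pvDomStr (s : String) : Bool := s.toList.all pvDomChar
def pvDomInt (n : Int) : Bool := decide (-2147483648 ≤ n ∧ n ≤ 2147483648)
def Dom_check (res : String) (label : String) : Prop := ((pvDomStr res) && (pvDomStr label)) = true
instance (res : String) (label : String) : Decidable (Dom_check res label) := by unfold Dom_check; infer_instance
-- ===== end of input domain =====

-- B replaces the nine sequential split-and-take-first passes by a single left-to-right
-- scan that stops at the first delimiter character (objective: simpler).

-- ===== PORT A =====
-- the 9/'s' trim and the final comparison, shared verbatim by both Python versions
def checkFinish (pred : List Char) (label : String) : Bool × String :=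
  let pred := if pred.length == 9 && PySem.List.pyGet? pred (-1) == some 's'
              then PySem.List.slice pred none (some (-1)) else pred
  (String.ofList pred == label, String.ofList pred)

def check (res : String) (label : String) : Bool × String :=
  let pred := PySem.Chars.strip res.toList
  let endTokens : List (List Char) := [[' '], [','], ['.'], ['!'], [':'], [')'], ['"'], ['\''], ['\n']]
  let pred := endTokens.foldl
    (fun p tok => PySem.List.pyGetD (PySem.Chars.splitOn p tok) 0 []) pred
  checkFinish pred label

-- ===== PORT B =====
-- Source B's loop over the stripped string with a break at the first delimiter
def cutAt (delims : List Char) : List Char → List Char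
  | [] => []
  | c :: cs => if delims.contains c then [] else c :: cutAt delims cs

def check_alt (res : String) (label : String) : Bool × String :=
  let s := PySem.Chars.strip res.toList
  let delims : List Char := [' ', ',', '.', '!', ':', ')', '"', '\'', '\n']
  let pred := cutAt delims s
  checkFinish pred label

-- ===== PRECONDITION & SPEC =====
def Spec_check (res : String) (label : String) (out : Bool × String) : Prop := out = check_alt res label
instance (res : String) (label : String) (out : Bool × String) : Decidable (Spec_check res label out) := by unfold Spec_check; infer_instance

-- ===== CLAIM (what is proved, stated in full; the proofs are below) =====
def Claim_equal_check : Prop := ∀ (res : String) (label : String), Dom_check res label → Spec_check res label (check res label)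

-- ===== LEMMAS AND PROOFS =====

-- head of splitOn.go when the accumulator is nonempty: the first piece is already fixed
theorem splitOn_go_acc (sep : List Char) (fuel : Nat) :
    ∀ (l cur : List Char) (a : List Char) (acc : List (List Char)),
      ∃ r, PySem.Chars.splitOn.go sep fuel l cur (acc ++ [a]) = a :: r := by
  induction fuel with
  | zero =>
    intro l cur a acc
    exact ⟨acc.reverse ++ [cur.reverse ++ l], by simp [PySem.Chars.splitOn.go]⟩
  | succ fuel ih =>
    intro l cur a acc
    cases l with
    | nil =>
      exact ⟨acc.reverse ++ [cur.reverse], by simp [PySem.Chars.splitOn.go]⟩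
    | cons c rest =>
      by_cases h : sep.isPrefixOf (c :: rest) = true
      · have := ih (List.drop sep.length (c :: rest)) [] a (cur.reverse :: acc)
        simpa [PySem.Chars.splitOn.go, h] using this
      · have := ih rest (c :: cur) a acc
        simpa [PySem.Chars.splitOn.go, h] using this

-- head of splitOn.go from an empty accumulator: the first piece is cur.reverse ++ takeWhile
theorem splitOn_go_head (c : Char) (fuel : Nat) :
    ∀ (l cur : List Char), l.length ≤ fuel →
      ∃ r, PySem.Chars.splitOn.go [c] fuel l cur [] = (cur.reverse ++ l.takeWhile (· != c)) :: r := by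
  induction fuel with
  | zero =>
    intro l cur h
    have hl : l = [] := List.eq_nil_of_length_eq_zero (Nat.le_zero.mp h)
    subst hl
    exact ⟨[], by simp [PySem.Chars.splitOn.go]⟩
  | succ fuel ih =>
    intro l cur h
    cases l with
    | nil => exact ⟨[], by simp [PySem.Chars.splitOn.go]⟩
    | cons d rest =>
      by_cases hd : d = c
      · subst hd
        have hpre : List.isPrefixOf [d] (d :: rest) = true := by simp [List.isPrefixOf]
        obtain ⟨r, hr⟩ := splitOn_go_acc [d] fuel rest [] cur.reverse []
        simp only [List.nil_append] at hr
        refine ⟨r, ?_⟩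
        simp [PySem.Chars.splitOn.go, hpre, List.takeWhile, hr]
      · have hpre : List.isPrefixOf [c] (d :: rest) = false := by
          simp [List.isPrefixOf]; exact fun h => absurd h.symm hd
        have hlen : rest.length ≤ fuel := Nat.le_of_succ_le_succ (by simpa using h)
        obtain ⟨r, hr⟩ := ih rest (d :: cur) hlen
        have hbne : (d != c) = true := by simp [bne, hd]
        refine ⟨r, ?_⟩
        simp [PySem.Chars.splitOn.go, hpre, hr, List.takeWhile, hbne]

-- one pass of A's loop body equals takeWhile
theorem step_eq_takeWhile (c : Char) (p : List Char) :
    PySem.List.pyGetD (PySem.Chars.splitOn p [c]) 0 [] = p.takeWhile (· != c) := by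
  obtain ⟨r, hr⟩ := splitOn_go_head c (p.length + 1) p [] (Nat.le_succ _)
  simp [PySem.Chars.splitOn, hr, PySem.List.pyGetD_zero_cons]

-- fusing two takeWhile passes
theorem takeWhile_takeWhile_and (p q : Char → Bool) (l : List Char) :
    (l.takeWhile p).takeWhile q = l.takeWhile (fun c => p c && q c) := by
  induction l with
  | nil => rfl
  | cons c cs ih =>
    by_cases hp : p c = true
    · by_cases hq : q c = true
      · simp [List.takeWhile, hp, hq, ih]
      · simp only [Bool.not_eq_true] at hq
        simp [List.takeWhile, hp, hq]
    · simp only [Bool.not_eq_true] at hp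
      simp [List.takeWhile, hp]

-- B's loop is takeWhile with the negated membership test
theorem cutAt_eq_takeWhile (delims : List Char) (l : List Char) :
    cutAt delims l = l.takeWhile (fun c => ! delims.contains c) := by
  induction l with
  | nil => rfl
  | cons c cs ih =>
    by_cases h : c ∈ delims
    · simp [cutAt, List.takeWhile, h]
    · simp [cutAt, List.takeWhile, h, ih]

-- the core: nine sequential first-field passes equal one scan to the first delimiter
theorem core (s : List Char) :
    ([[' '], [','], ['.'], ['!'], [':'], [')'], ['"'], ['\''], ['\n']] : List (List Char)).foldl
      (fun p tok => PySem.List.pyGetD (PySem.Chars.splitOn p tok) 0 []) s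
    = cutAt [' ', ',', '.', '!', ':', ')', '"', '\'', '\n'] s := by
  rw [cutAt_eq_takeWhile]
  simp only [List.foldl, step_eq_takeWhile, takeWhile_takeWhile_and]
  congr 1
  funext c
  by_cases h : c ∈ ([' ', ',', '.', '!', ':', ')', '"', '\'', '\n'] : List Char)
  · fin_cases h <;> decide
  · simp only [List.mem_cons, List.not_mem_nil, or_false, not_or] at h
    obtain ⟨h1, h2, h3, h4, h5, h6, h7, h8, h9⟩ := h
    simp [bne, h1, h2, h3, h4, h5, h6, h7, h8, h9]

theorem check_eq_alt (res label : String) : check res label = check_alt res label := by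
  show checkFinish
      (([[' '], [','], ['.'], ['!'], [':'], [')'], ['"'], ['\''], ['\n']] : List (List Char)).foldl
        (fun p tok => PySem.List.pyGetD (PySem.Chars.splitOn p tok) 0 [])
        (PySem.Chars.strip res.toList)) label
    = checkFinish (cutAt [' ', ',', '.', '!', ':', ')', '"', '\'', '\n']
        (PySem.Chars.strip res.toList)) label
  rw [core]

-- ===== VERDICT (by name: the statement is the Claim_ definition above) =====
theorem check_spec : Claim_equal_check := by
  intro res label _
  unfold Spec_check
  exact check_eq_alt res label
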